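-- pv_equiv track=rewrite | github.com/manthanrs/The_Peter_Clark_Algorithm | src/utils.py | calculate_shd_for_arrays
-- ===== SOURCE A (Python) =====
-- def calculate_shd_for_arrays(truth, est):
--     """
--     Calculates SHD between two 0/1 adjacency matrices.
--     0: No edge
--     1: Edge exists (i -> j)
--     If both adj[i,j] and adj[j,i] are 1, it's treated as undirected.
--     """
--     shd = 0
--     N = len(truth)
--
--     # We only need to look at each pair of nodes (i, j) once
--     for i in range(N):
--         for j in range(i + 1, N):
--             # Get the edge states for both graphs
--             # (i->j, j->i)
--             truth_edge = (truth[i][j], truth[j][i])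
--             est_edge = (est[i][j], est[j][i])
--
--             # If the edge patterns don't match exactly, it's an error
--             if truth_edge != est_edge:
--                 shd += 1
--
--     return shd
-- ===== SOURCE B (Python) =====
-- def calculate_shd_for_arrays(truth, est):
--     """SHD via a set of normalized mismatched node pairs (different decomposition:
--     scan every off-diagonal cell once, dedupe pairs in a set, return its size)."""
--     N = len(truth)
--     diff_pairs = set()
--     for i in range(N):
--         for j in range(N):
--             if i != j and truth[i][j] != est[i][j]:
--                 diff_pairs.add((min(i, j), max(i, j)))
--     return len(diff_pairs)
-- ===== Notes on version B (the rewrite author's own statement) =====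
-- stated objective: alternative
-- what changed: A counts tuple mismatches over upper-triangle pairs (i<j); B instead scans every off-diagonal cell once, inserts the normalized pair (min(i,j),max(i,j)) into a set whenever the single cell differs, and returns the set's size.
import Mathlib
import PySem

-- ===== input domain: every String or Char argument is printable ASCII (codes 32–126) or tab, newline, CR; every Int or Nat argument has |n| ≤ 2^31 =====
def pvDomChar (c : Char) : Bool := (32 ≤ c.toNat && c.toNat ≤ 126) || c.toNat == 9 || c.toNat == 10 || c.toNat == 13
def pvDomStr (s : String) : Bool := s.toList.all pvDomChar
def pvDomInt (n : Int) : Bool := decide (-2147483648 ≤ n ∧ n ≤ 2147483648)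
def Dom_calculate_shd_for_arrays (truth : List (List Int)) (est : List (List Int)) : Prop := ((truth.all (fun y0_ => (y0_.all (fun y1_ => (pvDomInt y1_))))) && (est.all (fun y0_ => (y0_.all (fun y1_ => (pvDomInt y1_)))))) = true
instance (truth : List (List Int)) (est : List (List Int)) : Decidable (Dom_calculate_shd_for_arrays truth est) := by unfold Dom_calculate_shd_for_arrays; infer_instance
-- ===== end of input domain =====

-- B replaces A's upper-triangle tuple-comparison count by a single scan of all off-diagonal
-- cells that collects normalized mismatched pairs in a set and returns its size (alternative
-- decomposition, same asymptotic cost).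


-- ===== PORT A =====
-- cell read m[i][j]; total via defaults, exact inside Pre_ (all indices in range there)
def pvCell (m : List (List Int)) (i j : Int) : Int :=
  PySem.List.pyGetD (PySem.List.pyGetD m i []) j 0

def calculate_shd_for_arrays (truth : List (List Int)) (est : List (List Int)) : Int :=
  let N : Int := (truth.length : Int)
  (PySem.List.pyRange 0 N 1).foldl (fun shd i =>
    (PySem.List.pyRange (i+1) N 1).foldl (fun shd j =>
      let truth_edge := (pvCell truth i j, pvCell truth j i)
      let est_edge := (pvCell est i j, pvCell est j i)
      if truth_edge ≠ est_edge then shd + 1 else shd) shd) 0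

-- ===== PORT B =====
def calculate_shd_for_arrays_alt (truth : List (List Int)) (est : List (List Int)) : Int :=
  let N : Int := (truth.length : Int)
  let diff_pairs : PySem.Set (Int × Int) :=
    (PySem.List.pyRange 0 N 1).foldl (fun s i =>
      (PySem.List.pyRange 0 N 1).foldl (fun s j =>
        if i ≠ j ∧ pvCell truth i j ≠ pvCell est i j then PySem.Set.add s (min i j, max i j) else s) s)
      PySem.Set.empty
  PySem.Set.len diff_pairs

-- ===== PRECONDITION & SPEC =====
-- Pre_ is exactly where the Python A returns (no IndexError): every off-diagonal cell
-- (i,j) with i,j < len(truth) must exist in both matrices.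
def Pre_calculate_shd_for_arrays (truth : List (List Int)) (est : List (List Int)) : Prop :=
  ∀ i < truth.length, ∀ j < truth.length, i ≠ j →
    i < est.length ∧ j < (truth.getD i []).length ∧ j < (est.getD i []).length
instance (truth : List (List Int)) (est : List (List Int)) : Decidable (Pre_calculate_shd_for_arrays truth est) := by unfold Pre_calculate_shd_for_arrays; infer_instance

def pvWitness_calculate_shd_for_arrays : List (List Int) × List (List Int) :=
  ([[0, 1], [1, 0]], [[0, 0], [1, 0]])

def Spec_calculate_shd_for_arrays (truth : List (List Int)) (est : List (List Int)) (out : Int) : Prop := out = calculate_shd_for_arrays_alt truth est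
instance (truth : List (List Int)) (est : List (List Int)) (out : Int) : Decidable (Spec_calculate_shd_for_arrays truth est out) := by unfold Spec_calculate_shd_for_arrays; infer_instance

-- ===== CLAIM (what is proved, stated in full; the proofs are below) =====
def Claim_equal_calculate_shd_for_arrays : Prop := ∀ (truth : List (List Int)) (est : List (List Int)), Dom_calculate_shd_for_arrays truth est → Pre_calculate_shd_for_arrays truth est → Spec_calculate_shd_for_arrays truth est (calculate_shd_for_arrays truth est)

-- ===== LEMMAS AND PROOFS =====

theorem pv_foldl_ite_add {α β : Type} [BEq β] (l : List α) (c : α → Prop) [DecidablePred c]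
    (h : α → β) (s : PySem.Set β) :
    l.foldl (fun s x => if c x then PySem.Set.add s (h x) else s) s
      = PySem.Set.update s ((l.filter (fun x => decide (c x))).map h) := by
  induction l generalizing s with
  | nil => simp [PySem.Set.update_nil]
  | cons hd tl ih =>
      by_cases hc : c hd <;>
        simp [hc, List.foldl_cons, ih, PySem.Set.update_cons]

-- upper-triangle pair list of A's traversal
def pvAP (N : Int) : List (Int × Int) :=
  (PySem.List.pyRange 0 N 1).flatMap (fun i => (PySem.List.pyRange (i+1) N 1).map (fun j => (i, j)))

-- all-ordered-off-diagonal pair list of B's traversal (diagonal filtered later)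
def pvBP (N : Int) : List (Int × Int) :=
  (PySem.List.pyRange 0 N 1).flatMap (fun i => (PySem.List.pyRange 0 N 1).map (fun j => (i, j)))

theorem pv_shd_eq (N : Int) (f g : Int → Int → Int) :
    (PySem.List.pyRange 0 N 1).foldl (fun shd i =>
      (PySem.List.pyRange (i+1) N 1).foldl (fun shd j =>
        if (f i j, f j i) ≠ (g i j, g j i) then shd + 1 else shd) shd) 0
    = PySem.Set.len ((PySem.List.pyRange 0 N 1).foldl (fun s i =>
        (PySem.List.pyRange 0 N 1).foldl (fun s j =>
          if i ≠ j ∧ f i j ≠ g i j then PySem.Set.add s (min i j, max i j) else s) s)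
        PySem.Set.empty) := by
  have hA : (PySem.List.pyRange 0 N 1).foldl (fun shd i =>
      (PySem.List.pyRange (i+1) N 1).foldl (fun shd j =>
        if (f i j, f j i) ≠ (g i j, g j i) then shd + 1 else shd) shd) (0 : Int)
      = (((pvAP N).filter (fun p => decide ((f p.1 p.2, f p.2 p.1) ≠ (g p.1 p.2, g p.2 p.1)))).length : Int) := by
    have h1 : (pvAP N).foldl (fun shd p =>
        if (f p.1 p.2, f p.2 p.1) ≠ (g p.1 p.2, g p.2 p.1) then shd + 1 else shd) (0 : Int)
        = (PySem.List.pyRange 0 N 1).foldl (fun shd i =>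
          (PySem.List.pyRange (i+1) N 1).foldl (fun shd j =>
            if (f i j, f j i) ≠ (g i j, g j i) then shd + 1 else shd) shd) (0 : Int) := by
      rw [pvAP, List.foldl_flatMap]
      simp only [List.foldl_map]
    have h2 := PySem.List.foldl_count_if
      (fun p : Int × Int => decide ((f p.1 p.2, f p.2 p.1) ≠ (g p.1 p.2, g p.2 p.1))) (pvAP N) 0
    simp only [decide_eq_true_eq] at h2
    rw [← h1, h2, List.countP_eq_length_filter]
    simp
  have hB : ((PySem.List.pyRange 0 N 1).foldl (fun s i =>
        (PySem.List.pyRange 0 N 1).foldl (fun s j =>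
          if i ≠ j ∧ f i j ≠ g i j then PySem.Set.add s (min i j, max i j) else s) s)
        PySem.Set.empty)
      = PySem.Set.ofList (((pvBP N).filter (fun p => decide (p.1 ≠ p.2 ∧ f p.1 p.2 ≠ g p.1 p.2))).map
          (fun p => (min p.1 p.2, max p.1 p.2))) := by
    have h1 : (pvBP N).foldl (fun s p =>
        if p.1 ≠ p.2 ∧ f p.1 p.2 ≠ g p.1 p.2 then PySem.Set.add s (min p.1 p.2, max p.1 p.2) else s)
        PySem.Set.empty
        = (PySem.List.pyRange 0 N 1).foldl (fun s i =>
          (PySem.List.pyRange 0 N 1).foldl (fun s j =>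
            if i ≠ j ∧ f i j ≠ g i j then PySem.Set.add s (min i j, max i j) else s) s)
          PySem.Set.empty := by
      rw [pvBP, List.foldl_flatMap]
      simp only [List.foldl_map]
    rw [← h1, pv_foldl_ite_add, PySem.Set.update_empty]
  rw [hB, hA, PySem.Set.len]
  congr 1
  have hnodAP : (pvAP N).Nodup := by
    rw [pvAP]
    refine List.nodup_flatMap.mpr ⟨?_, ?_⟩
    · intro i _
      exact (PySem.List.nodup_pyRange_one _ _).map (fun a b h => by simpa using h)
    · refine (PySem.List.pairwise_lt_pyRange_one 0 N).imp ?_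
      intro a b hab y hy hy'
      simp only [List.mem_map] at hy hy'
      obtain ⟨j, _, rfl⟩ := hy
      obtain ⟨j', _, h⟩ := hy'
      have : a = b := ((Prod.mk.injEq _ _ _ _).mp h.symm).1
      omega
  have hmem : ∀ a : Int × Int,
      a ∈ PySem.Set.ofList (((pvBP N).filter (fun p => decide (p.1 ≠ p.2 ∧ f p.1 p.2 ≠ g p.1 p.2))).map
          (fun p => (min p.1 p.2, max p.1 p.2)))
      ↔ a ∈ (pvAP N).filter (fun p => decide ((f p.1 p.2, f p.2 p.1) ≠ (g p.1 p.2, g p.2 p.1))) := by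
    intro a
    obtain ⟨x, y⟩ := a
    simp only [PySem.Set.mem_ofList, List.mem_map, List.mem_filter, pvAP, pvBP,
      List.mem_flatMap, PySem.List.mem_pyRange_one, decide_eq_true_eq,
      Prod.mk.injEq, ne_eq, not_and_or]
    constructor
    · rintro ⟨⟨i, j⟩, ⟨⟨i', hi', j', hj', heq⟩, hne, hm⟩, hmin, hmax⟩
      obtain ⟨h1, h2⟩ := Prod.mk.injEq i' j' i j ▸ heq
      subst h1; subst h2
      simp only at hne hm hmin hmax
      rcases lt_or_gt_of_ne (fun h => hne h) with hlt | hgt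
      · have e1 : min i' j' = i' := min_eq_left (le_of_lt hlt)
        have e2 : max i' j' = j' := max_eq_right (le_of_lt hlt)
        rw [e1] at hmin; rw [e2] at hmax; subst hmin; subst hmax
        exact ⟨⟨i', hi', j', ⟨by omega, hj'.2⟩, rfl, rfl⟩, Or.inl hm⟩
      · have e1 : min i' j' = j' := min_eq_right (le_of_lt hgt)
        have e2 : max i' j' = i' := max_eq_left (le_of_lt hgt)
        rw [e1] at hmin; rw [e2] at hmax; subst hmin; subst hmax
        exact ⟨⟨j', hj', i', ⟨by omega, hi'.2⟩, rfl, rfl⟩, Or.inr hm⟩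
    · rintro ⟨⟨i, hi, j, hj, rfl, rfl⟩, hD⟩
      have hij : i < j := by omega
      rcases hD with hm | hm
      · exact ⟨(i, j), ⟨⟨i, hi, j, ⟨by omega, hj.2⟩, rfl⟩, by simp; omega, hm⟩,
          min_eq_left (le_of_lt hij), max_eq_right (le_of_lt hij)⟩
      · exact ⟨(j, i), ⟨⟨j, ⟨by omega, hj.2⟩, i, ⟨hi.1, by omega⟩, rfl⟩, by simp; omega, hm⟩,
          min_eq_right (le_of_lt hij), max_eq_left (le_of_lt hij)⟩
  have hperm := (List.perm_ext_iff_of_nodup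
    (PySem.Set.nodup_ofList (((pvBP N).filter (fun p => decide (p.1 ≠ p.2 ∧ f p.1 p.2 ≠ g p.1 p.2))).map
      (fun p => (min p.1 p.2, max p.1 p.2))))
    (hnodAP.filter _)).mpr hmem
  exact hperm.length_eq.symm

-- ===== VERDICT (by name: the statement is the Claim_ definition above) =====
theorem calculate_shd_for_arrays_spec : Claim_equal_calculate_shd_for_arrays := by
  intro truth est _ _
  unfold Spec_calculate_shd_for_arrays calculate_shd_for_arrays calculate_shd_for_arrays_alt
  exact pv_shd_eq (truth.length : Int) (pvCell truth) (pvCell est)
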